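-- pv_equiv track=rewrite | github.com/CarmelitaBraga/code-and-about | practicing-codes/p1/sim4/u4/5103615108710400/solution.py | all_vogais
-- ===== SOURCE A (Python) =====
-- def all_vogais(word):
--     somaa = somae = somai = somao = somau = 0
--     for e in word:
--         if e == 'a':
--             somaa += 1
--         if e == 'e':
--             somae += 1
--         if e == 'i':
--             somai += 1
--         if e == 'o':
--             somao += 1
--         if e == 'u':
--             somau += 1
--
--     if somaa*somae*somai*somao*somau != 0:
--         return word
-- ===== SOURCE B (Python) =====
-- def all_vogais(word):
--     if set('aeiou').issubset(word):
--         return word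
-- ===== Notes on version B (the rewrite author's own statement) =====
-- stated objective: idiomatic
-- what changed: Replaced the five per-vowel counters accumulated in a character scan and combined by a product with a direct vowel-subset membership test over the word.
import Mathlib
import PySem

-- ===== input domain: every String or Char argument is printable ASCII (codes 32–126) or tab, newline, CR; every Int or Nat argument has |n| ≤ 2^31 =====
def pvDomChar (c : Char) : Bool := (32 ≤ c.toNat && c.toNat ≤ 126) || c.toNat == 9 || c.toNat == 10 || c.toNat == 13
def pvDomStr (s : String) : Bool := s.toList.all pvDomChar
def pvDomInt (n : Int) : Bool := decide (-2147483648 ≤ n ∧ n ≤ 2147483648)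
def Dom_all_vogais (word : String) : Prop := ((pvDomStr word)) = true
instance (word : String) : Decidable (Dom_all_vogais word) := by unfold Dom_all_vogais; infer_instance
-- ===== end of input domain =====

-- B replaces A's five counters and product test by a direct vowel-subset membership test (idiomatic).

-- ===== PORT A =====
-- the loop body: five independent `if`s bumping the matching counter
def allVogaisStep : Nat × Nat × Nat × Nat × Nat → Char → Nat × Nat × Nat × Nat × Nat
  | (sa, se, si, so, su), e =>
    (if e = 'a' then sa + 1 else sa,
     if e = 'e' then se + 1 else se,
     if e = 'i' then si + 1 else si,
     if e = 'o' then so + 1 else so,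
     if e = 'u' then su + 1 else su)

def all_vogais (word : String) : Option String :=
  let s := word.toList.foldl allVogaisStep (0, 0, 0, 0, 0)
  if s.1 * s.2.1 * s.2.2.1 * s.2.2.2.1 * s.2.2.2.2 ≠ 0 then some word else none

-- ===== PORT B =====
def all_vogais_alt (word : String) : Option String :=
  if ['a', 'e', 'i', 'o', 'u'].all (fun v => word.toList.contains v) then some word else none

-- ===== PRECONDITION & SPEC =====
def Spec_all_vogais (word : String) (out : Option String) : Prop := out = all_vogais_alt word
instance (word : String) (out : Option String) : Decidable (Spec_all_vogais word out) := by unfold Spec_all_vogais; infer_instance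

-- ===== CLAIM (what is proved, stated in full; the proofs are below) =====
def Claim_equal_all_vogais : Prop := ∀ (word : String), Dom_all_vogais word → Spec_all_vogais word (all_vogais word)

-- ===== LEMMAS AND PROOFS =====
theorem allVogais_fold_count (l : List Char) (sa se si so su : Nat) :
    l.foldl allVogaisStep (sa, se, si, so, su) =
      (sa + l.count 'a', se + l.count 'e', si + l.count 'i', so + l.count 'o', su + l.count 'u') := by
  induction l generalizing sa se si so su with
  | nil => simp
  | cons c t ih =>
    simp only [List.foldl_cons, allVogaisStep, List.count_cons, ih, Prod.mk.injEq, beq_iff_eq]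
    refine ⟨?_, ?_, ?_, ?_, ?_⟩ <;> split_ifs <;> omega

-- ===== VERDICT (by name: the statement is the Claim_ definition above) =====
theorem all_vogais_spec : Claim_equal_all_vogais := by
  intro word _
  unfold Spec_all_vogais all_vogais all_vogais_alt
  simp only [allVogais_fold_count, Nat.zero_add]
  simp [List.all_cons,
    ← List.count_pos_iff, Nat.pos_iff_ne_zero, and_assoc]
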